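-- pv_equiv track=rewrite | github.com/HunterBowie/assembler | assembler.py | make_int
-- ===== SOURCE A (Python) =====
-- HEX_CHARS = [
--     "0","1","2","3","4","5","6","7","8","9","a","b","c","d","e","f"
-- ]
--
-- BIN_CHARS = [
--     "0","1"
-- ]
--
-- def make_int(value):
--     if value[:2] == "0b":
--         value = value[2:]
--         value = value[::-1]
--         digit = 1
--         num = 0
--         for i in range(len(value)):
--             num += BIN_CHARS.index(value[i]) * digit
--             digit = digit * 2
--         return num
--     elif value[:2] == "0x":
--         value = value[2:]
--         value = value[::-1]
--         digit = 1
--         num = 0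
--         for i in range(len(value)):
--             num += HEX_CHARS.index(value[i]) * digit
--             digit = digit * 16
--         return num
--     else:
--         return int(value)
-- ===== SOURCE B (Python) =====
-- HEX_CHARS = [
--     "0","1","2","3","4","5","6","7","8","9","a","b","c","d","e","f"
-- ]
--
-- BIN_CHARS = [
--     "0","1"
-- ]
--
-- def make_int(value):
--     if value[:2] == "0b":
--         base, chars = 2, BIN_CHARS
--     elif value[:2] == "0x":
--         base, chars = 16, HEX_CHARS
--     else:
--         return int(value)
--     digits = {ch: i for i, ch in enumerate(chars)}
--     num = 0
--     for ch in value[2:]: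
--         num = num * base + digits[ch]
--     return num
-- ===== Notes on version B (the rewrite author's own statement) =====
-- stated objective: simpler
-- what changed: Single unified branch selecting base/charset from the prefix, forward Horner accumulation (num = num*base + digit) over the suffix using a precomputed char->value dict, instead of two duplicated loops that reverse the string and track a power-of-base multiplier with list.index.
import Mathlib
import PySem

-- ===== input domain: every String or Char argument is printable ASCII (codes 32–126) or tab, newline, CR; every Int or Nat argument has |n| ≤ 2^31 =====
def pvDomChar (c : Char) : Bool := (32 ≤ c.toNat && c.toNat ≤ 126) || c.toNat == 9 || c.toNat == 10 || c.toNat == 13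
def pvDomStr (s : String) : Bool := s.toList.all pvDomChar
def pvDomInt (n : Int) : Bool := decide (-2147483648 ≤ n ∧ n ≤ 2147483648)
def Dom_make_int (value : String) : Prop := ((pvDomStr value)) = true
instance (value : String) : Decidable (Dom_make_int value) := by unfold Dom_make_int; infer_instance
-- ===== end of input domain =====

-- B rewrites the parser as a single forward-Horner loop with a char->value dict;
-- the equivalence is about the return value on inputs where A returns normally (Pre_).

def pvHEX : List Char := ['0','1','2','3','4','5','6','7','8','9','a','b','c','d','e','f']
def pvBIN : List Char := ['0','1']

-- ===== PORT A =====
def make_int (value : String) : Int :=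
  let v := value.toList
  if PySem.List.slice v none (some 2) = ['0','b'] then
    -- value = value[2:]; value = value[::-1]
    let v2 := (PySem.List.slice? (PySem.List.slice v (some 2) none) none none (-1)).getD []
    -- digit = 1; num = 0; for i in range(len(value)): num += BIN_CHARS.index(value[i])*digit; digit *= 2
    ((PySem.List.pyRange 0 v2.length 1).foldl
      (fun (st : Int × Int) i =>
        (st.1 * 2, st.2 + ((PySem.List.index? pvBIN (PySem.List.pyGetD v2 i ' ')).getD 0 : Int) * st.1))
      (1, 0)).2
  else if PySem.List.slice v none (some 2) = ['0','x'] then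
    let v2 := (PySem.List.slice? (PySem.List.slice v (some 2) none) none none (-1)).getD []
    ((PySem.List.pyRange 0 v2.length 1).foldl
      (fun (st : Int × Int) i =>
        (st.1 * 16, st.2 + ((PySem.List.index? pvHEX (PySem.List.pyGetD v2 i ' ')).getD 0 : Int) * st.1))
      (1, 0)).2
  else
    (PySem.Int.ofStr? value).getD 0

-- ===== PORT B =====
def make_int_alt (value : String) : Int :=
  let v := value.toList
  let pre := PySem.List.slice v none (some 2)
  if pre = ['0','b'] ∨ pre = ['0','x'] then
    let base : Int := if pre = ['0','b'] then 2 else 16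
    let chars := if pre = ['0','b'] then pvBIN else pvHEX
    -- digits = {ch: i for i, ch in enumerate(chars)}
    let digits := (PySem.List.enumerate chars 0).foldl
      (fun (d : PySem.Dict Char Int) p => d.insert p.2 p.1) PySem.Dict.empty
    -- num = 0; for ch in value[2:]: num = num * base + digits[ch]
    (PySem.List.slice v (some 2) none).foldl (fun num c => num * base + digits.getD c 0) 0
  else
    (PySem.Int.ofStr? value).getD 0

-- ===== PRECONDITION & SPEC =====
-- Pre_ excludes exactly the inputs on which A raises ValueError/KeyError: a '0b'/'0x'
-- prefix followed by a character outside the (lowercase) charset, or a non-prefixed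
-- string that int() rejects.
def Pre_make_int (value : String) : Prop :=
  (value.toList.take 2 = ['0','b'] → (value.toList.drop 2).all pvBIN.contains = true) ∧
  (value.toList.take 2 = ['0','x'] → (value.toList.drop 2).all pvHEX.contains = true) ∧
  (value.toList.take 2 ≠ ['0','b'] → value.toList.take 2 ≠ ['0','x'] →
    (PySem.Int.ofStr? value).isSome = true)
instance (value : String) : Decidable (Pre_make_int value) := by unfold Pre_make_int; infer_instance
def pvWitness_make_int : String := "0x1f"

def Spec_make_int (value : String) (out : Int) : Prop := out = make_int_alt value
instance (value : String) (out : Int) : Decidable (Spec_make_int value out) := by unfold Spec_make_int; infer_instance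

-- ===== CLAIM (what is proved, stated in full; the proofs are below) =====
def Claim_equal_make_int : Prop := ∀ (value : String), Dom_make_int value → Pre_make_int value → Spec_make_int value (make_int value)

-- ===== LEMMAS AND PROOFS =====

theorem pvSliceTo2 {α : Type} (xs : List α) : PySem.List.slice xs none (some 2) = xs.take 2 := by
  have := PySem.List.slice_to xs (show (0:Int) ≤ 2 by norm_num)
  simpa using this

theorem pvSliceFrom2 {α : Type} (xs : List α) : PySem.List.slice xs (some 2) none = xs.drop 2 := by
  have := PySem.List.slice_from xs (show (0:Int) ≤ 2 by norm_num)
  simpa using this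

/-- value of the suffix `w` read least-significant-first in base `b` under digit map `f`. -/
def pvH (f : Char → Int) (b : Int) (w : List Char) : Int :=
  w.foldr (fun c acc => f c + b * acc) 0

theorem pvH_congr (f g : Char → Int) (b : Int) (w : List Char)
    (h : ∀ c ∈ w, f c = g c) : pvH f b w = pvH g b w := by
  induction w with
  | nil => rfl
  | cons c w ih =>
    simp only [pvH, List.foldr] at *
    rw [h c (by simp), ih (fun c hc => h c (by simp [hc]))]

theorem pvH_append (f : Char → Int) (b : Int) (w : List Char) (c : Char) :
    pvH f b (w ++ [c]) = pvH f b w + f c * b ^ w.length := by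
  induction w with
  | nil => simp [pvH]
  | cons d w ih =>
    simp only [pvH, List.foldr, List.cons_append, List.length_cons] at *
    rw [ih, pow_succ]; ring

theorem pvLoopA_eq (f : Char → Int) (b : Int) (w : List Char) (n d : Int) :
    w.foldl (fun (st : Int × Int) c => (st.1 * b, st.2 + f c * st.1)) (d, n)
      = (d * b ^ w.length, n + d * pvH f b w) := by
  induction w generalizing n d with
  | nil => simp [pvH]
  | cons c w ih =>
    simp only [List.foldl, pvH, List.foldr] at *
    rw [ih]
    simp only [List.length_cons, Prod.mk.injEq]
    exact ⟨by rw [pow_succ]; ring, by ring⟩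

theorem pvLoopB_eq (f : Char → Int) (b : Int) (v : List Char) (n : Int) :
    v.foldl (fun num c => num * b + f c) n = n * b ^ v.length + pvH f b v.reverse := by
  induction v generalizing n with
  | nil => simp [pvH]
  | cons c v ih =>
    simp only [List.foldl, List.reverse_cons, List.length_cons]
    rw [ih, pvH_append]
    simp only [List.length_reverse]
    rw [pow_succ]; ring

def pvBinDict : PySem.Dict Char Int :=
  (PySem.List.enumerate pvBIN 0).foldl
    (fun (d : PySem.Dict Char Int) p => d.insert p.2 p.1) PySem.Dict.empty
def pvHexDict : PySem.Dict Char Int :=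
  (PySem.List.enumerate pvHEX 0).foldl
    (fun (d : PySem.Dict Char Int) p => d.insert p.2 p.1) PySem.Dict.empty

theorem pvBin_agree (c : Char) (hc : c ∈ pvBIN) :
    ((PySem.List.index? pvBIN c).getD 0 : Int) = pvBinDict.getD c 0 := by
  fin_cases hc <;> decide

theorem pvHex_agree (c : Char) (hc : c ∈ pvHEX) :
    ((PySem.List.index? pvHEX c).getD 0 : Int) = pvHexDict.getD c 0 := by
  fin_cases hc <;> decide

-- ===== VERDICT (by name: the statement is the Claim_ definition above) =====
theorem make_int_spec : Claim_equal_make_int := by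
  intro value _ hpre
  unfold Spec_make_int make_int make_int_alt
  obtain ⟨hb, hx, _⟩ := hpre
  simp only [pvSliceTo2, pvSliceFrom2, PySem.List.slice?_none_none_neg_one, Option.getD_some]
  by_cases h1 : value.toList.take 2 = ['0', 'b']
  · simp only [h1, true_or, if_true]
    rw [PySem.List.foldl_pyRange_zero_pyGetD' (List.drop 2 value.toList).reverse ' '
        (fun (st : Int × Int) c => (st.1 * 2, st.2 + ((PySem.List.index? pvBIN c).getD 0 : Int) * st.1)) (1, 0)]
    rw [pvLoopA_eq (fun c => ((PySem.List.index? pvBIN c).getD 0 : Int)) 2 _ 0 1,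
        pvLoopB_eq (fun c =>
          (List.foldl (fun (d : PySem.Dict Char Int) p => d.insert p.2 p.1) PySem.Dict.empty
            (PySem.List.enumerate pvBIN 0)).getD c 0) 2 _ 0]
    simp only [zero_mul, zero_add, one_mul]
    refine pvH_congr _ _ 2 _ (fun c hc => pvBin_agree c ?_)
    have := List.all_eq_true.mp (hb h1) c (by simpa using hc)
    simpa using this
  · by_cases h2 : value.toList.take 2 = ['0', 'x']
    · simp only [h2, or_true, if_true,
        if_neg (show ¬((['0','x'] : List Char) = ['0','b']) from by decide)]
      rw [PySem.List.foldl_pyRange_zero_pyGetD' (List.drop 2 value.toList).reverse ' '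
          (fun (st : Int × Int) c => (st.1 * 16, st.2 + ((PySem.List.index? pvHEX c).getD 0 : Int) * st.1)) (1, 0)]
      rw [pvLoopA_eq (fun c => ((PySem.List.index? pvHEX c).getD 0 : Int)) 16 _ 0 1,
          pvLoopB_eq (fun c =>
            (List.foldl (fun (d : PySem.Dict Char Int) p => d.insert p.2 p.1) PySem.Dict.empty
              (PySem.List.enumerate pvHEX 0)).getD c 0) 16 _ 0]
      simp only [zero_mul, zero_add, one_mul]
      refine pvH_congr _ _ 16 _ (fun c hc => pvHex_agree c ?_)
      have := List.all_eq_true.mp (hx h2) c (by simpa using hc)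
      simpa using this
    · simp only [h1, h2, or_self, if_false]
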